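-- pv_equiv track=rewrite | github.com/yshaprut/SmallProjects | TicTacToe.py | check_move_creates_2winning_moves
-- ===== SOURCE A (Python) =====
-- EMPTY_SQUARE_SIGN = "-"
--
-- NO_WIN_MOVE = -1
--
-- def check_is_move_creates_2winning_moves(_board: list, _sign_to_check: str, _row: int, _col: int):
--     board_size = len(_board)
--     move_counter = 0
--     #check row
--     check_counter = 0
--     empty_square_flag = 0
--     for run_on_row in range(board_size):
--         if _board[run_on_row][_col] == _sign_to_check:
--             check_counter += 1
--         elif _board[run_on_row][_col] == EMPTY_SQUARE_SIGN:
--             empty_square_flag = 1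
--     if check_counter == board_size - 1 and empty_square_flag == 1:
--         move_counter += 1
--
--     #check col
--     check_counter = 0
--     empty_square_flag = 0
--     for run_on_col in range(board_size):
--         if _board[_row][run_on_col] == _sign_to_check:
--             check_counter += 1
--         elif _board[_row][run_on_col] == EMPTY_SQUARE_SIGN:
--             empty_square_flag = 1
--     if check_counter == board_size - 1 and empty_square_flag == 1:
--         move_counter += 1
--
--     #check diagonal 1
--     if _row == _col:
--         check_counter = 0
--         empty_square_flag = 0
--         for row_col in range(board_size):
--             if _board[row_col][row_col] == _sign_to_check:
--                 check_counter += 1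
--             elif _board[row_col][row_col] == EMPTY_SQUARE_SIGN:
--                 empty_square_flag = 1
--         if check_counter == board_size - 1 and empty_square_flag == 1:
--             move_counter += 1
--
--     #check diagonal 2
--     is_on_diagonal_2 = False
--     for num in range(board_size):
--            if num == _row and (board_size - num - 1) == _col:
--                is_on_diagonal_2 = True
--
--     if is_on_diagonal_2 == True:
--         check_counter = 0
--         empty_square_flag = 0
--         for num in range(board_size):
--             if _board[num][board_size - num - 1] == _sign_to_check:
--                 check_counter += 1
--             elif _board[num][board_size - num - 1] == EMPTY_SQUARE_SIGN:
--                 empty_square_flag = 1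
--         if check_counter == board_size - 1 and empty_square_flag == 1:
--             move_counter += 1
--
--     if 2 <= move_counter:
--         return True
--     else:
--         return False
--
-- def check_move_creates_2winning_moves(_board: list, _sign_to_check: str):
--     board_size = len(_board)
--     for row in range(board_size):
--         for col in range(board_size):
--             if _board[row][col] == EMPTY_SQUARE_SIGN:
--                 _board[row][col] = _sign_to_check
--                 answer = check_is_move_creates_2winning_moves(_board, _sign_to_check, row, col)
--                 _board[row][col] = EMPTY_SQUARE_SIGN
--                 if answer == True:
--                     return  row, col
--     else:
--         return NO_WIN_MOVE, NO_WIN_MOVE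
-- ===== SOURCE B (Python) =====
-- EMPTY_SQUARE_SIGN = "-"
--
-- NO_WIN_MOVE = -1
--
-- def check_move_creates_2winning_moves(_board, _sign_to_check):
--     n = len(_board)
--
--     def counts(cells):
--         s = e = 0
--         for v in cells:
--             if v == _sign_to_check:
--                 s += 1
--             elif v == EMPTY_SQUARE_SIGN:
--                 e += 1
--         return s, e
--
--     # Precompute (sign count, empty count) for every column, every row and both diagonals.
--     col_cnt = [counts([_board[i][c] for i in range(n)]) for c in range(n)]
--     row_cnt = [counts([_board[r][j] for j in range(n)]) for r in range(n)]
--     d1_cnt = counts([_board[i][i] for i in range(n)])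
--     d2_cnt = counts([_board[i][n - 1 - i] for i in range(n)])
--
--     def wins(cnt):
--         # after placing the sign on an empty cell of this line:
--         # signs become cnt[0]+1 and one empty square is used up.
--         s, e = cnt
--         return s + 1 == n - 1 and e >= 2
--
--     for r in range(n):
--         for c in range(n):
--             if _board[r][c] == EMPTY_SQUARE_SIGN:
--                 m = int(wins(col_cnt[c])) + int(wins(row_cnt[r]))
--                 if r == c:
--                     m += int(wins(d1_cnt))
--                 if r + c == n - 1:
--                     m += int(wins(d2_cnt))
--                 if m >= 2:
--                     return r, c
--     return NO_WIN_MOVE, NO_WIN_MOVE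
-- ===== Notes on version B (the rewrite author's own statement) =====
-- stated objective: alternative
-- what changed: Instead of re-scanning all four lines for every empty cell after a trial placement as A does, B precomputes (sign count, empty count) for every row, column and both diagonals once and tests each empty cell by count arithmetic alone.
-- outside the precondition, e.g. on check_move_creates_2winning_moves([['x', 'o', 'o'], ['-', 'x', '-'], ['-']], 'x'): A returns (1, 0), B raises IndexError
import Mathlib
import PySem

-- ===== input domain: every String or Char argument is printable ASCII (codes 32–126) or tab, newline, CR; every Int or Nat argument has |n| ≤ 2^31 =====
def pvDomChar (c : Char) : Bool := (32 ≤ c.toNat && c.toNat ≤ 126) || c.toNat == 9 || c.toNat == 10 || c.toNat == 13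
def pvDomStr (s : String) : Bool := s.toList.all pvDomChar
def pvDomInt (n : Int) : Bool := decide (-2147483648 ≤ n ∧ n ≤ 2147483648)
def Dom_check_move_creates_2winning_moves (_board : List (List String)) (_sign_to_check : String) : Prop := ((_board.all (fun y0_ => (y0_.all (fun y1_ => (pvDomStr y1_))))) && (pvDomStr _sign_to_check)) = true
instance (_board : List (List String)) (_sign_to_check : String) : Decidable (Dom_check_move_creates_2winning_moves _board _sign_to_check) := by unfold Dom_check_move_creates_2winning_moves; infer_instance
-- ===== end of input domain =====

-- B replaces A's per-empty-cell rescan of all four lines after a trial placement by one upfront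
-- precomputation of (sign count, empty count) per row/column/diagonal and a count-arithmetic test per cell.
-- A temporarily mutates the board and restores it (no net mutation); the ports are purely functional.

-- ===== PORT A =====
-- _board[i][j]; total via defaults — exact under Pre_ (indices come from range(board_size), rows long enough)
def pvGetA (b : List (List String)) (i j : Int) : String :=
  PySem.List.pyGetD (PySem.List.pyGetD b i []) j ""

-- _board[i][j] = v ; i, j are range(board_size) indices (nonnegative), so pySetD is exact
def pvASetCell (b : List (List String)) (i j : Int) (v : String) : List (List String) :=
  PySem.List.pySetD b i (PySem.List.pySetD (PySem.List.pyGetD b i []) j v)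

def check_is_move_creates_2winning_moves (_board : List (List String)) (_sign_to_check : String)
    (_row _col : Int) : Bool :=
  let board_size : Int := _board.length
  let move_counter : Int := 0
  -- check row (scans column _col)
  let p1 := (PySem.List.pyRange 0 board_size 1).foldl (fun (st : Int × Int) i =>
      if pvGetA _board i _col == _sign_to_check then (st.1 + 1, st.2)
      else if pvGetA _board i _col == "-" then (st.1, 1) else st) (0, 0)
  let move_counter := if p1.1 == board_size - 1 && p1.2 == 1 then move_counter + 1 else move_counter
  -- check col (scans row _row)
  let p2 := (PySem.List.pyRange 0 board_size 1).foldl (fun (st : Int × Int) j =>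
      if pvGetA _board _row j == _sign_to_check then (st.1 + 1, st.2)
      else if pvGetA _board _row j == "-" then (st.1, 1) else st) (0, 0)
  let move_counter := if p2.1 == board_size - 1 && p2.2 == 1 then move_counter + 1 else move_counter
  -- check diagonal 1
  let move_counter :=
    if _row == _col then
      let p3 := (PySem.List.pyRange 0 board_size 1).foldl (fun (st : Int × Int) i =>
        if pvGetA _board i i == _sign_to_check then (st.1 + 1, st.2)
        else if pvGetA _board i i == "-" then (st.1, 1) else st) (0, 0)
      if p3.1 == board_size - 1 && p3.2 == 1 then move_counter + 1 else move_counter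
    else move_counter
  -- check diagonal 2 membership loop
  let is_on_diagonal_2 := (PySem.List.pyRange 0 board_size 1).foldl (fun acc num =>
      if num == _row && board_size - num - 1 == _col then true else acc) false
  let move_counter :=
    if is_on_diagonal_2 then
      let p4 := (PySem.List.pyRange 0 board_size 1).foldl (fun (st : Int × Int) i =>
        if pvGetA _board i (board_size - i - 1) == _sign_to_check then (st.1 + 1, st.2)
        else if pvGetA _board i (board_size - i - 1) == "-" then (st.1, 1) else st) (0, 0)
      if p4.1 == board_size - 1 && p4.2 == 1 then move_counter + 1 else move_counter
    else move_counter
  decide (2 ≤ move_counter)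

def pvALoopCols (b : List (List String)) (sign : String) (r : Int) : List Int → Option (Int × Int)
  | [] => none
  | c :: cs =>
    if pvGetA b r c == "-" then
      -- place the sign, run the check, restore (functionally: check the modified board)
      if check_is_move_creates_2winning_moves (pvASetCell b r c sign) sign r c then some (r, c)
      else pvALoopCols b sign r cs
    else pvALoopCols b sign r cs

def pvALoopRows (b : List (List String)) (sign : String) : List Int → Option (Int × Int)
  | [] => none
  | r :: rs =>
    match pvALoopCols b sign r (PySem.List.pyRange 0 (b.length : Int) 1) with
    | some rc => some rc
    | none => pvALoopRows b sign rs

def check_move_creates_2winning_moves (_board : List (List String)) (_sign_to_check : String) : Int × Int :=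
  (pvALoopRows _board _sign_to_check (PySem.List.pyRange 0 (_board.length : Int) 1)).getD (-1, -1)

-- ===== PORT B =====
-- one pass over a line: (count of sign, count of empty squares), with Python's if/elif order
def pvCounts (sign : String) (cells : List String) : Int × Int :=
  cells.foldl (fun (p : Int × Int) v =>
    if v == sign then (p.1 + 1, p.2) else if v == "-" then (p.1, p.2 + 1) else p) (0, 0)

def pvWinsB (n : Int) (cnt : Int × Int) : Bool :=
  cnt.1 + 1 == n - 1 && decide (2 ≤ cnt.2)

def pvBCell (n : Int) (colCnt rowCnt : List (Int × Int)) (d1 d2 : Int × Int) (r c : Int) : Bool :=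
  let m : Int := (if pvWinsB n (PySem.List.pyGetD colCnt c (0, 0)) then 1 else 0)
               + (if pvWinsB n (PySem.List.pyGetD rowCnt r (0, 0)) then 1 else 0)
  let m := if r == c then m + (if pvWinsB n d1 then 1 else 0) else m
  let m := if r + c == n - 1 then m + (if pvWinsB n d2 then 1 else 0) else m
  decide (2 ≤ m)

def pvBLoopCols (b : List (List String)) (n : Int) (colCnt rowCnt : List (Int × Int))
    (d1 d2 : Int × Int) (r : Int) : List Int → Option (Int × Int)
  | [] => none
  | c :: cs =>
    if pvGetA b r c == "-" then
      if pvBCell n colCnt rowCnt d1 d2 r c then some (r, c)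
      else pvBLoopCols b n colCnt rowCnt d1 d2 r cs
    else pvBLoopCols b n colCnt rowCnt d1 d2 r cs

def pvBLoopRows (b : List (List String)) (n : Int) (colCnt rowCnt : List (Int × Int))
    (d1 d2 : Int × Int) : List Int → Option (Int × Int)
  | [] => none
  | r :: rs =>
    match pvBLoopCols b n colCnt rowCnt d1 d2 r (PySem.List.pyRange 0 n 1) with
    | some rc => some rc
    | none => pvBLoopRows b n colCnt rowCnt d1 d2 rs

def check_move_creates_2winning_moves_alt (_board : List (List String)) (_sign_to_check : String) : Int × Int :=
  let n : Int := _board.length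
  let R := PySem.List.pyRange 0 n 1
  let colCnt := R.map (fun c => pvCounts _sign_to_check (R.map (fun i => pvGetA _board i c)))
  let rowCnt := R.map (fun r => pvCounts _sign_to_check (R.map (fun j => pvGetA _board r j)))
  let d1 := pvCounts _sign_to_check (R.map (fun i => pvGetA _board i i))
  let d2 := pvCounts _sign_to_check (R.map (fun i => pvGetA _board i (n - 1 - i)))
  (pvBLoopRows _board n colCnt rowCnt d1 d2 R).getD (-1, -1)

-- ===== PRECONDITION & SPEC =====
-- Pre_ excludes ragged boards (a row shorter than the board): on those A's indexing raises IndexError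
-- on almost all of them (A can accidentally return early before touching the missing cell; B, which
-- precomputes all lines up front, raises there).
def Pre_check_move_creates_2winning_moves (_board : List (List String)) (_sign_to_check : String) : Prop :=
  ∀ row ∈ _board, _board.length ≤ row.length
instance (_board : List (List String)) (_sign_to_check : String) : Decidable (Pre_check_move_creates_2winning_moves _board _sign_to_check) := by unfold Pre_check_move_creates_2winning_moves; infer_instance

def pvWitness_check_move_creates_2winning_moves : List (List String) × String :=
  ([["-", "-"], ["x", "-"]], "x")

def Spec_check_move_creates_2winning_moves (_board : List (List String)) (_sign_to_check : String) (out : Int × Int) : Prop := out = check_move_creates_2winning_moves_alt _board _sign_to_check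
instance (_board : List (List String)) (_sign_to_check : String) (out : Int × Int) : Decidable (Spec_check_move_creates_2winning_moves _board _sign_to_check out) := by unfold Spec_check_move_creates_2winning_moves; infer_instance

-- ===== CLAIM (what is proved, stated in full; the proofs are below) =====
def Claim_equal_check_move_creates_2winning_moves : Prop := ∀ (_board : List (List String)) (_sign_to_check : String), Dom_check_move_creates_2winning_moves _board _sign_to_check → Pre_check_move_creates_2winning_moves _board _sign_to_check → Spec_check_move_creates_2winning_moves _board _sign_to_check (check_move_creates_2winning_moves _board _sign_to_check)

-- ===== LEMMAS AND PROOFS =====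

def pvS (sign : String) (L : List String) : Nat := L.countP (· == sign)
def pvE (sign : String) (L : List String) : Nat := L.countP (fun v => v != sign && v == "-")

theorem pvScan_closed (sign : String) (L : List String) : ∀ (a f : Int),
    L.foldl (fun (st : Int × Int) v =>
      if v == sign then (st.1 + 1, st.2) else if v == "-" then (st.1, 1) else st) (a, f)
    = (a + (pvS sign L : Int), if pvE sign L = 0 then f else 1) := by
  induction L with
  | nil => intro a f; simp [pvS, pvE]
  | cons v L ih =>
    intro a f
    by_cases hs : v = sign
    · subst hs
      simp only [List.foldl_cons, beq_self_eq_true, if_true, ih, pvS, pvE, List.countP_cons]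
      simp
      omega
    · by_cases he : v = "-"
      · subst he
        simp only [List.foldl_cons, ih, pvS, pvE, List.countP_cons]
        simp [hs]
      · simp only [List.foldl_cons, ih, pvS, pvE, List.countP_cons]
        simp [hs, he]

theorem pvCounts_closed (sign : String) (L : List String) :
    pvCounts sign L = ((pvS sign L : Int), (pvE sign L : Int)) := by
  suffices h : ∀ a e : Int, L.foldl (fun (p : Int × Int) v =>
      if v == sign then (p.1 + 1, p.2) else if v == "-" then (p.1, p.2 + 1) else p) (a, e)
      = (a + (pvS sign L : Int), e + (pvE sign L : Int)) by
    unfold pvCounts; simpa using h 0 0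
  induction L with
  | nil => intro a e; simp [pvS, pvE]
  | cons v L ih =>
    intro a e
    by_cases hs : v = sign
    · subst hs
      simp only [List.foldl_cons, beq_self_eq_true, if_true, ih, pvS, pvE, List.countP_cons]
      simp; omega
    · by_cases he : v = "-"
      · subst he
        simp only [List.foldl_cons, ih, pvS, pvE, List.countP_cons]
        simp [hs]; omega
      · simp only [List.foldl_cons, ih, pvS, pvE, List.countP_cons]
        simp [hs, he]

theorem pvGetA_set (b : List (List String)) (r c : Int) (v : String)
    (hPre : ∀ row ∈ b, b.length ≤ row.length)
    (hr0 : 0 ≤ r) (hrn : r < (b.length : Int)) (hc0 : 0 ≤ c) (hcn : c < (b.length : Int))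
    (i j : Int) (hi0 : 0 ≤ i) (hin : i < (b.length : Int)) (hj0 : 0 ≤ j) (hjn : j < (b.length : Int)) :
    pvGetA (pvASetCell b r c v) i j = if i = r ∧ j = c then v else pvGetA b i j := by
  have hrl : r.toNat < b.length := by omega
  have hil : i.toNat < b.length := by omega
  have hrow : b.length ≤ (b[r.toNat]'hrl).length := hPre _ (List.getElem_mem _)
  have hM : pvASetCell b r c v = b.set r.toNat ((b[r.toNat]'hrl).set c.toNat v) := by
    unfold pvASetCell
    rw [PySem.List.pySetD_of_nonneg b _ hr0, PySem.List.pyGetD_eq_getElem b [] hr0 hrn,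
      PySem.List.pySetD_of_nonneg _ v hc0]
  rw [hM]
  unfold pvGetA
  rw [PySem.List.pyGetD_eq_getElem _ [] hi0 (by simpa using hin),
      PySem.List.pyGetD_eq_getElem b [] hi0 hin]
  by_cases hir : i = r
  · subst hir
    rw [show (b.set i.toNat ((b[i.toNat]'hrl).set c.toNat v))[i.toNat]'(by simpa using hil)
        = (b[i.toNat]'hrl).set c.toNat v by simp [List.getElem_set]]
    by_cases hjc : j = c
    · subst hjc
      rw [if_pos ⟨rfl, rfl⟩]
      rw [PySem.List.pyGetD_eq_getElem _ "" hj0 (by push_cast [List.length_set]; omega)]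
      simp [List.getElem_set]
    · rw [if_neg (by tauto)]
      rw [PySem.List.pyGetD_of_nonneg _ "" hj0, PySem.List.pyGetD_of_nonneg _ "" hj0]
      rcases Nat.lt_or_ge j.toNat (b[i.toNat]'hrl).length with h | h
      · rw [List.getD_eq_getElem _ _ (by simpa using h), List.getD_eq_getElem _ _ h]
        simp [List.getElem_set]
        intro hh; exfalso; apply hjc; omega
      · rw [List.getD_eq_default _ _ (by simpa using h), List.getD_eq_default _ _ h]
  · rw [if_neg (by tauto)]
    rw [show (b.set r.toNat ((b[r.toNat]'hrl).set c.toNat v))[i.toNat]'(by simpa using hil)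
        = b[i.toNat]'hil by rw [List.getElem_set]; simp only [if_neg (by omega : ¬ r.toNat = i.toNat)]]

theorem pvMapLine (n : Int) (g g0 : Int → String) (t : Int) (ht0 : 0 ≤ t) (htn : t < n) (v : String)
    (hg : ∀ i : Int, 0 ≤ i → i < n → g i = if i = t then v else g0 i) :
    (PySem.List.pyRange 0 n 1).map g = ((PySem.List.pyRange 0 n 1).map g0).set t.toNat v := by
  apply List.ext_getElem
  · simp [PySem.List.length_pyRange_one]
  · intro k h1 h2
    have hk : k < (n - 0).toNat := by
      simpa [PySem.List.length_pyRange_one] using h1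
    simp only [List.getElem_map, List.getElem_set,
      PySem.List.getElem_pyRange_one 0 n k (by simpa [PySem.List.length_pyRange_one] using hk)]
    rw [hg (0 + (k : Int)) (by omega) (by omega)]
    by_cases hkt : k = t.toNat
    · rw [if_pos (by omega : 0 + (k:Int) = t), if_pos (by omega)]
    · rw [if_neg (by omega : ¬ 0 + (k:Int) = t), if_neg (by omega)]


theorem pvLine_eq (sign : String) (n : Int) (L : List String) (k : Nat)
    (hk : k < L.length) (hL : L[k] = "-") :
    ((((0 : Int) + (pvS sign (L.set k sign) : Int)) == n - 1)
      && ((if pvE sign (L.set k sign) = 0 then (0 : Int) else 1) == 1))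
    = (((pvS sign L : Int) + 1 == n - 1) && decide ((2 : Int) ≤ (pvE sign L : Int))) := by
  by_cases hs : sign = "-"
  · subst hs
    rw [show L.set k "-" = L by rw [← hL]; exact List.set_getElem_self hk]
    have hE : pvE "-" L = 0 := by simp [pvE]
    simp [hE]
  · have hns : ("-" : String) ≠ sign := fun h => hs (Eq.symm h)
    have hS : pvS sign (L.set k sign) = pvS sign L + 1 := by
      unfold pvS
      rw [List.countP_set hk, hL]
      simp [hns]
    have hE1 : 1 ≤ pvE sign L := by
      unfold pvE
      have h0 : 0 < L.countP (fun v => v != sign && v == "-") := by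
        rw [List.countP_pos_iff]
        refine ⟨L[k], List.getElem_mem hk, ?_⟩
        rw [hL]; simp [hns]
      omega
    have hE : pvE sign (L.set k sign) = pvE sign L - 1 := by
      unfold pvE
      rw [List.countP_set hk, hL]
      simp [hns]
    rw [hS, hE, Bool.eq_iff_iff]
    simp only [Bool.and_eq_true, beq_iff_eq, decide_eq_true_eq]
    constructor
    · rintro ⟨h1, h2⟩
      constructor
      · push_cast at h1 ⊢; omega
      · by_cases hz : pvE sign L - 1 = 0
        · rw [if_pos hz] at h2; norm_num at h2
        · push_cast; omega
    · rintro ⟨h1, h2⟩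
      constructor
      · push_cast; push_cast at h1; omega
      · rw [if_neg (by omega)]

theorem pvFoldOr (p : Int → Bool) (L : List Int) : ∀ a : Bool,
    L.foldl (fun acc num => if p num then true else acc) a = (a || L.any p) := by
  induction L with
  | nil => intro a; simp
  | cons x L ih =>
    intro a
    rw [List.foldl_cons]
    by_cases hp : p x
    · rw [if_pos hp, ih]; simp [hp]
    · rw [if_neg hp, ih]; simp [hp]

theorem pvD2mem (n r c : Int) (hr0 : 0 ≤ r) (hrn : r < n) :
    (PySem.List.pyRange 0 n 1).foldl (fun acc num =>
      if num == r && n - num - 1 == c then true else acc) false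
    = (r + c == n - 1) := by
  rw [pvFoldOr]
  rw [Bool.eq_iff_iff]
  simp only [Bool.false_or, List.any_eq_true, PySem.List.mem_pyRange_one,
    Bool.and_eq_true, beq_iff_eq]
  constructor
  · rintro ⟨x, ⟨hx0, hxn⟩, hxr, hxc⟩; omega
  · intro h; exact ⟨r, ⟨hr0, hrn⟩, rfl, by omega⟩


theorem pvLineFold_eq (sign : String) (n : Int) (g g0 : Int → String) (t : Int)
    (ht0 : 0 ≤ t) (htn : t < n)
    (hg : ∀ i : Int, 0 ≤ i → i < n → g i = if i = t then sign else g0 i)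
    (hempty : g0 t = "-") :
    (((PySem.List.pyRange 0 n 1).foldl (fun (st : Int × Int) i =>
        if g i == sign then (st.1 + 1, st.2)
        else if g i == "-" then (st.1, 1) else st) (0, 0)).1 == n - 1
      && (((PySem.List.pyRange 0 n 1).foldl (fun (st : Int × Int) i =>
        if g i == sign then (st.1 + 1, st.2)
        else if g i == "-" then (st.1, 1) else st) (0, 0)).2 == 1))
    = pvWinsB n (pvCounts sign ((PySem.List.pyRange 0 n 1).map g0)) := by
  have hfold : (PySem.List.pyRange 0 n 1).foldl (fun (st : Int × Int) i =>
        if g i == sign then (st.1 + 1, st.2)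
        else if g i == "-" then (st.1, 1) else st) (0, 0)
      = ((PySem.List.pyRange 0 n 1).map g).foldl (fun (st : Int × Int) v =>
        if v == sign then (st.1 + 1, st.2)
        else if v == "-" then (st.1, 1) else st) (0, 0) := by
    rw [List.foldl_map]
  have hset := pvMapLine n g g0 t ht0 htn sign hg
  have hkl : t.toNat < ((PySem.List.pyRange 0 n 1).map g0).length := by
    simp [PySem.List.length_pyRange_one]; omega
  have hLk : ((PySem.List.pyRange 0 n 1).map g0)[t.toNat]'hkl = "-" := by
    simp only [List.getElem_map,
      PySem.List.getElem_pyRange_one 0 n t.toNat (by simpa [PySem.List.length_pyRange_one] using hkl)]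
    rw [show (0 + (t.toNat : Int)) = t by omega, hempty]
  rw [hfold, hset, pvScan_closed]
  simp only []
  rw [pvLine_eq sign n _ t.toNat hkl hLk]
  rw [pvWinsB, pvCounts_closed]

theorem pvCell_eq (b : List (List String)) (sign : String)
    (hPre : ∀ row ∈ b, b.length ≤ row.length)
    (r c : Int) (hr0 : 0 ≤ r) (hrn : r < (b.length : Int))
    (hc0 : 0 ≤ c) (hcn : c < (b.length : Int))
    (hempty : pvGetA b r c = "-") :
    check_is_move_creates_2winning_moves (pvASetCell b r c sign) sign r c
    = pvBCell (b.length : Int)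
        ((PySem.List.pyRange 0 (b.length : Int) 1).map (fun cc => pvCounts sign ((PySem.List.pyRange 0 (b.length : Int) 1).map (fun i => pvGetA b i cc))))
        ((PySem.List.pyRange 0 (b.length : Int) 1).map (fun rr => pvCounts sign ((PySem.List.pyRange 0 (b.length : Int) 1).map (fun j => pvGetA b rr j))))
        (pvCounts sign ((PySem.List.pyRange 0 (b.length : Int) 1).map (fun i => pvGetA b i i)))
        (pvCounts sign ((PySem.List.pyRange 0 (b.length : Int) 1).map (fun i => pvGetA b i ((b.length : Int) - 1 - i))))
        r c := by
  have hMn : (((pvASetCell b r c sign).length : Nat) : Int) = (b.length : Int) := by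
    unfold pvASetCell; rw [PySem.List.length_pySetD]
  have hgen := pvGetA_set b r c sign hPre hr0 hrn hc0 hcn
  unfold check_is_move_creates_2winning_moves pvBCell
  simp only [hMn]
  rw [PySem.List.pyGetD_map_pyRange_of_nonneg _ _ c _ hc0 hcn,
      PySem.List.pyGetD_map_pyRange_of_nonneg _ _ r _ hr0 hrn]
  rw [pvD2mem (b.length : Int) r c hr0 hrn]
  simp only [show ∀ i : Int, (b.length : Int) - i - 1 = (b.length : Int) - 1 - i
    from fun i => by ring]
  rw [pvLineFold_eq sign (b.length : Int) (fun i => pvGetA (pvASetCell b r c sign) i c)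
        (fun i => pvGetA b i c) r hr0 hrn
        (fun i hi0 hin => by
          beta_reduce
          rw [hgen i c hi0 hin hc0 hcn]
          by_cases hir : i = r
          · rw [if_pos ⟨hir, rfl⟩, if_pos hir]
          · rw [if_neg (fun hh => hir hh.1), if_neg hir])
        hempty]
  rw [pvLineFold_eq sign (b.length : Int) (fun j => pvGetA (pvASetCell b r c sign) r j)
        (fun j => pvGetA b r j) c hc0 hcn
        (fun j hj0 hjn => by
          beta_reduce
          rw [hgen r j hr0 hrn hj0 hjn]
          by_cases hjc : j = c
          · rw [if_pos ⟨rfl, hjc⟩, if_pos hjc]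
          · rw [if_neg (fun hh => hjc hh.2), if_neg hjc])
        hempty]
  by_cases hrc : r = c
  · have hg1 : ((r == c) = true) := beq_iff_eq.mpr hrc
    rw [if_pos hg1, if_pos hg1]
    rw [pvLineFold_eq sign (b.length : Int) (fun i => pvGetA (pvASetCell b r c sign) i i)
          (fun i => pvGetA b i i) r hr0 hrn
          (fun i hi0 hin => by
            beta_reduce
            rw [hgen i i hi0 hin hi0 hin]
            by_cases hir : i = r
            · rw [if_pos ⟨hir, by omega⟩, if_pos hir]
            · rw [if_neg (fun hh => hir hh.1), if_neg hir])
          (by beta_reduce; rw [← hrc] at hempty; exact hempty)]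
    by_cases hd2 : r + c = (b.length : Int) - 1
    · have hg2 : ((r + c == (b.length : Int) - 1) = true) := beq_iff_eq.mpr hd2
      rw [pvLineFold_eq sign (b.length : Int)
            (fun i => pvGetA (pvASetCell b r c sign) i ((b.length : Int) - 1 - i))
            (fun i => pvGetA b i ((b.length : Int) - 1 - i)) r hr0 hrn
            (fun i hi0 hin => by
              beta_reduce
              rw [hgen i ((b.length : Int) - 1 - i) hi0 hin (by omega) (by omega)]
              by_cases hir : i = r
              · rw [if_pos ⟨hir, by omega⟩, if_pos hir]
              · rw [if_neg (fun hh => hir hh.1), if_neg hir])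
            (by beta_reduce; rw [show (b.length : Int) - 1 - r = c by omega]; exact hempty)]
      rw [if_pos hg2, if_pos hg2]
      by_cases h1 : pvWinsB (b.length : Int) (pvCounts sign ((PySem.List.pyRange 0 (b.length : Int) 1).map (fun i => pvGetA b i c))) <;>
      by_cases h2 : pvWinsB (b.length : Int) (pvCounts sign ((PySem.List.pyRange 0 (b.length : Int) 1).map (fun j => pvGetA b r j))) <;>
      by_cases h3 : pvWinsB (b.length : Int) (pvCounts sign ((PySem.List.pyRange 0 (b.length : Int) 1).map (fun i => pvGetA b i i))) <;>
      by_cases h4 : pvWinsB (b.length : Int) (pvCounts sign ((PySem.List.pyRange 0 (b.length : Int) 1).map (fun i => pvGetA b i ((b.length : Int) - 1 - i)))) <;>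
      simp [h1, h2, h3, h4]
    · have hg2 : ¬ ((r + c == (b.length : Int) - 1) = true) := by simpa using hd2
      rw [if_neg hg2, if_neg hg2]
      by_cases h1 : pvWinsB (b.length : Int) (pvCounts sign ((PySem.List.pyRange 0 (b.length : Int) 1).map (fun i => pvGetA b i c))) <;>
      by_cases h2 : pvWinsB (b.length : Int) (pvCounts sign ((PySem.List.pyRange 0 (b.length : Int) 1).map (fun j => pvGetA b r j))) <;>
      by_cases h3 : pvWinsB (b.length : Int) (pvCounts sign ((PySem.List.pyRange 0 (b.length : Int) 1).map (fun i => pvGetA b i i))) <;>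
      simp [h1, h2, h3]
  · have hg1 : ¬ ((r == c) = true) := by simpa using hrc
    rw [if_neg hg1, if_neg hg1]
    by_cases hd2 : r + c = (b.length : Int) - 1
    · have hg2 : ((r + c == (b.length : Int) - 1) = true) := beq_iff_eq.mpr hd2
      rw [pvLineFold_eq sign (b.length : Int)
            (fun i => pvGetA (pvASetCell b r c sign) i ((b.length : Int) - 1 - i))
            (fun i => pvGetA b i ((b.length : Int) - 1 - i)) r hr0 hrn
            (fun i hi0 hin => by
              beta_reduce
              rw [hgen i ((b.length : Int) - 1 - i) hi0 hin (by omega) (by omega)]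
              by_cases hir : i = r
              · rw [if_pos ⟨hir, by omega⟩, if_pos hir]
              · rw [if_neg (fun hh => hir hh.1), if_neg hir])
            (by beta_reduce; rw [show (b.length : Int) - 1 - r = c by omega]; exact hempty)]
      rw [if_pos hg2, if_pos hg2]
      by_cases h1 : pvWinsB (b.length : Int) (pvCounts sign ((PySem.List.pyRange 0 (b.length : Int) 1).map (fun i => pvGetA b i c))) <;>
      by_cases h2 : pvWinsB (b.length : Int) (pvCounts sign ((PySem.List.pyRange 0 (b.length : Int) 1).map (fun j => pvGetA b r j))) <;>
      by_cases h4 : pvWinsB (b.length : Int) (pvCounts sign ((PySem.List.pyRange 0 (b.length : Int) 1).map (fun i => pvGetA b i ((b.length : Int) - 1 - i)))) <;>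
      simp [h1, h2, h4]
    · have hg2 : ¬ ((r + c == (b.length : Int) - 1) = true) := by simpa using hd2
      rw [if_neg hg2, if_neg hg2]
      by_cases h1 : pvWinsB (b.length : Int) (pvCounts sign ((PySem.List.pyRange 0 (b.length : Int) 1).map (fun i => pvGetA b i c))) <;>
      by_cases h2 : pvWinsB (b.length : Int) (pvCounts sign ((PySem.List.pyRange 0 (b.length : Int) 1).map (fun j => pvGetA b r j))) <;>
      simp [h1, h2]

theorem pvLoopCols_eq (b : List (List String)) (sign : String)
    (colCnt rowCnt : List (Int × Int)) (d1 d2 : Int × Int) (r : Int) (cl : List Int)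
    (h : ∀ c ∈ cl, pvGetA b r c = "-" →
      check_is_move_creates_2winning_moves (pvASetCell b r c sign) sign r c
        = pvBCell (b.length : Int) colCnt rowCnt d1 d2 r c) :
    pvALoopCols b sign r cl = pvBLoopCols b (b.length : Int) colCnt rowCnt d1 d2 r cl := by
  induction cl with
  | nil => rfl
  | cons c cs ih =>
    rw [pvALoopCols, pvBLoopCols]
    by_cases he : pvGetA b r c = "-"
    · rw [if_pos (beq_iff_eq.mpr he), if_pos (beq_iff_eq.mpr he),
        h c (List.mem_cons_self) he, ih (fun c' hc' => h c' (List.mem_cons_of_mem _ hc'))]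
    · rw [if_neg (by simpa using he), if_neg (by simpa using he),
        ih (fun c' hc' => h c' (List.mem_cons_of_mem _ hc'))]

theorem pvLoopRows_eq (b : List (List String)) (sign : String)
    (colCnt rowCnt : List (Int × Int)) (d1 d2 : Int × Int) (rl : List Int)
    (h : ∀ r ∈ rl, ∀ c ∈ PySem.List.pyRange 0 (b.length : Int) 1, pvGetA b r c = "-" →
      check_is_move_creates_2winning_moves (pvASetCell b r c sign) sign r c
        = pvBCell (b.length : Int) colCnt rowCnt d1 d2 r c) :
    pvALoopRows b sign rl = pvBLoopRows b (b.length : Int) colCnt rowCnt d1 d2 rl := by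
  induction rl with
  | nil => rfl
  | cons r rs ih =>
    rw [pvALoopRows, pvBLoopRows]
    rw [pvLoopCols_eq b sign colCnt rowCnt d1 d2 r _ (h r List.mem_cons_self)]
    rw [ih (fun r' hr' => h r' (List.mem_cons_of_mem _ hr'))]

-- ===== VERDICT (by name: the statement is the Claim_ definition above) =====
theorem check_move_creates_2winning_moves_spec : Claim_equal_check_move_creates_2winning_moves := by
  intro b sign hDom hPre
  unfold Spec_check_move_creates_2winning_moves
  unfold check_move_creates_2winning_moves check_move_creates_2winning_moves_alt
  rw [pvLoopRows_eq b sign _ _ _ _ _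
    (fun r hr c hc he => by
      have hrb := PySem.List.mem_pyRange_one.mp hr
      have hcb := PySem.List.mem_pyRange_one.mp hc
      exact pvCell_eq b sign hPre r c hrb.1 hrb.2 hcb.1 hcb.2 he)]
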